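-- pv_equiv track=rewrite | github.com/GreatChenLab/O-GlyThr | all_feature_extraciton.py | _transform
-- ===== SOURCE A (Python) =====
-- def _transform(sequence, class1, class2, class3):
--     char = ''
--     for element in sequence:
--         if element in class1:
--             char += 'P'
--         elif element in class2:
--             char += 'N'
--         elif element in class3:
--             char += 'H'
--         else:
--             char += 'X'
--     return char
-- ===== SOURCE B (Python) =====
-- def _transform(sequence, class1, class2, class3):
--     labels = ['X'] * len(sequence)
--     for cls, lab in ((class3, 'H'), (class2, 'N'), (class1, 'P')):
--         labels = [lab if e in cls else l for l, e in zip(labels, sequence)]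
--     return ''.join(labels)
-- ===== Notes on version B (the rewrite author's own statement) =====
-- stated objective: alternative
-- what changed: B replaces A's single pass with a per-character if/elif chain by staged whole-sequence stamping passes: it starts from an all-'X' label list and makes one pass per class (class3 then class2 then class1), rewriting the label of every position whose character is in that class, so later (higher-priority) passes overwrite earlier ones.
import Mathlib
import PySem

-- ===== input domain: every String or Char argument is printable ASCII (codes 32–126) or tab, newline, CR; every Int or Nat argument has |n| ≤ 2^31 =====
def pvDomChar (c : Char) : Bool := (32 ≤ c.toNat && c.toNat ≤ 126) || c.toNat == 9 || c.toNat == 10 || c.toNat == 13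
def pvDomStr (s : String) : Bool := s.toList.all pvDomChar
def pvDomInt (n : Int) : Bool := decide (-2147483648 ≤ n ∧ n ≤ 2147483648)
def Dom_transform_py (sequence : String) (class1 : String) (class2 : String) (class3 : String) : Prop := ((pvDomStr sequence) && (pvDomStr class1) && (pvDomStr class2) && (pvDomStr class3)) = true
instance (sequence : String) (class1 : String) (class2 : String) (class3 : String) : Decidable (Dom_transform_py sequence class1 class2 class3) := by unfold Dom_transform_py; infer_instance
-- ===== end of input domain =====

-- B replaces A's single pass with per-character if/elif chain by staged whole-sequence
-- stamping passes over an all-'X' label list (class3, then class2, then class1, so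
-- higher-priority passes overwrite); objective: alternative, same results.

-- ===== PORT A =====
-- 'element in classK' on a 1-char element is Python's substring test: PySem.Chars.isIn [c] …
def transform_py (sequence : String) (class1 : String) (class2 : String) (class3 : String) : String :=
  String.mk (sequence.toList.foldl (fun char element =>
    if PySem.Chars.isIn [element] class1.toList then char ++ ['P']
    else if PySem.Chars.isIn [element] class2.toList then char ++ ['N']
    else if PySem.Chars.isIn [element] class3.toList then char ++ ['H']
    else char ++ ['X']) [])

-- ===== PORT B =====
-- one stamping pass: '[lab if e in cls else l for l, e in zip(labels, sequence)]'
def stampPass (labels : List Char) (seq : List Char) (cls : List Char) (lab : Char) : List Char :=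
  (labels.zip seq).map (fun p => if PySem.Chars.isIn [p.2] cls then lab else p.1)

def transform_py_alt (sequence : String) (class1 : String) (class2 : String) (class3 : String) : String :=
  let s := sequence.toList
  let labels0 := s.map (fun _ => 'X')   -- ['X'] * len(sequence)
  let labels1 := stampPass labels0 s class3.toList 'H'
  let labels2 := stampPass labels1 s class2.toList 'N'
  let labels3 := stampPass labels2 s class1.toList 'P'
  String.mk labels3

-- ===== PRECONDITION & SPEC =====
def Spec_transform_py (sequence : String) (class1 : String) (class2 : String) (class3 : String) (out : String) : Prop := out = transform_py_alt sequence class1 class2 class3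
instance (sequence : String) (class1 : String) (class2 : String) (class3 : String) (out : String) : Decidable (Spec_transform_py sequence class1 class2 class3 out) := by unfold Spec_transform_py; infer_instance

-- ===== CLAIM (what is proved, stated in full; the proofs are below) =====
def Claim_equal_transform_py : Prop := ∀ (sequence : String) (class1 : String) (class2 : String) (class3 : String), Dom_transform_py sequence class1 class2 class3 → Spec_transform_py sequence class1 class2 class3 (transform_py sequence class1 class2 class3)

-- ===== LEMMAS AND PROOFS =====

theorem foldl_append_label (f : Char → Char) (l acc : List Char) :
    (l.foldl (fun char element => char ++ [f element]) acc) = acc ++ l.map f := by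
  induction l generalizing acc with
  | nil => simp
  | cons a t ih => simp [ih]

-- stamping a pass over labels that are a pointwise function of the sequence
theorem stampPass_map (f : Char → Char) (s cls : List Char) (lab : Char) :
    stampPass (s.map f) s cls lab
      = s.map (fun e => if PySem.Chars.isIn [e] cls then lab else f e) := by
  induction s with
  | nil => rfl
  | cons a t ih => simp [stampPass, List.zip] at ih ⊢; exact ih

-- ===== VERDICT (by name: the statement is the Claim_ definition above) =====
theorem transform_py_spec : Claim_equal_transform_py := by
  intro sequence class1 class2 class3 _
  unfold Spec_transform_py transform_py transform_py_alt
  have hfun : (fun (char : List Char) (element : Char) =>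
      if PySem.Chars.isIn [element] class1.toList then char ++ ['P']
      else if PySem.Chars.isIn [element] class2.toList then char ++ ['N']
      else if PySem.Chars.isIn [element] class3.toList then char ++ ['H']
      else char ++ ['X'])
    = (fun char element => char ++ [if PySem.Chars.isIn [element] class1.toList then 'P'
        else if PySem.Chars.isIn [element] class2.toList then 'N'
        else if PySem.Chars.isIn [element] class3.toList then 'H'
        else 'X']) := by
    funext char element; split_ifs <;> rfl
  rw [hfun, foldl_append_label]
  show _ = String.mk (stampPass (stampPass (stampPass (sequence.toList.map (fun _ => 'X'))
    sequence.toList class3.toList 'H') sequence.toList class2.toList 'N')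
    sequence.toList class1.toList 'P')
  rw [stampPass_map, stampPass_map, stampPass_map]
  simp only [List.nil_append]
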